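-- pv_equiv track=rewrite | github.com/ZSG-Studios/F76PriceGuide | F76PriceGuide.py | build_starred_values
-- ===== SOURCE A (Python) =====
-- def build_starred_values(mods: dict) -> list:
--     """
--     Returns a flat sorted list of "★★★ ModName" strings — one per name×star combo.
--     Sorted by star tier first (1★ → 4★), then alphabetically within each tier.
--     """
--     entries = []
--     # Collect all (star, name) pairs first so we can sort by star then name
--     pairs = []
--     for name, star_list in mods.items():
--         stars = star_list if isinstance(star_list, list) else [star_list]
--         for s in stars:
--             pairs.append((s, name))
--     pairs.sort(key=lambda x: (x[0], x[1].lower()))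
--     for s, name in pairs:
--         entries.append(f"{'★' * s} {name}")
--     return entries
-- ===== SOURCE B (Python) =====
-- def build_starred_values(mods: dict) -> list:
--     """Group-then-sort: bucket the names per star tier in one pass over mods,
--     then walk the tiers in sorted order, sorting each bucket case-insensitively."""
--     buckets = {}
--     for name, star_list in mods.items():
--         stars = star_list if isinstance(star_list, list) else [star_list]
--         for s in stars:
--             buckets.setdefault(s, []).append(name)
--     out = []
--     for tier in sorted(buckets):
--         for name in sorted(buckets[tier], key=str.lower):
--             out.append(f"{'★' * tier} {name}")
--     return out
-- ===== Notes on version B (the rewrite author's own statement) =====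
-- stated objective: alternative
-- what changed: Replaces A's single global sort of all (star, name) pairs by a tuple key with a group-by decomposition: one pass buckets the names per star tier into a dict, then the distinct tiers are walked in sorted order and each bucket is stably sorted case-insensitively on its own.
import Mathlib
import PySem

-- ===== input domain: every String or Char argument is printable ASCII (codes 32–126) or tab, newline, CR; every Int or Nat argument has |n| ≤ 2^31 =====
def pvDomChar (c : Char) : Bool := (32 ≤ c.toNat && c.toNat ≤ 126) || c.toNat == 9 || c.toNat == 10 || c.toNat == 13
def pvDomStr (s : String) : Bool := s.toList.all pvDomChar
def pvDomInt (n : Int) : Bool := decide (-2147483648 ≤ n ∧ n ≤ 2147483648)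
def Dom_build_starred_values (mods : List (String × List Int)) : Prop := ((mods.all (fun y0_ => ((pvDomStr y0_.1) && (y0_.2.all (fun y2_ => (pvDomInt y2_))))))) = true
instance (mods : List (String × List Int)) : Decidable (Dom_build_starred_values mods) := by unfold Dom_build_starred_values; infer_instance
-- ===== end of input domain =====

-- B replaces A's single global sort of all (star, name) pairs by a group-by decomposition
-- (sorted distinct tiers, then one per-tier name bucket collected and sorted); objective: alternative.

-- ===== PORT A =====
def build_starred_values (mods : List (String × List Int)) : List String :=
  let entries : List String := []
  let pairs : List (Int × String) :=
    mods.foldl (fun pairs m =>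
      -- 'stars = star_list if isinstance(star_list, list) else [star_list]': under the type
      -- convention star_list : List Int, so isinstance(star_list, list) is always true and stars = m.2
      m.2.foldl (fun pairs s => pairs ++ [(s, m.1)]) pairs) []
  let pairs := PySem.List.sorted2 pairs (fun x => x.1) (fun x => PySem.Str.lower x.2) false
  pairs.foldl (fun entries p =>
    entries ++ [String.ofList (PySem.List.pyRepeat ['★'] p.1 ++ ' ' :: p.2.toList)]) entries

-- ===== PORT B =====
def build_starred_values_alt (mods : List (String × List Int)) : List String :=
  let buckets : PySem.Dict Int (List String) :=
    mods.foldl (fun buckets m =>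
      -- stars = star_list (isinstance(star_list, list) is always true under the type convention);
      -- buckets.setdefault(s, []).append(name) is one update buckets[s] = buckets.get(s, []) + [name]
      m.2.foldl (fun buckets s => buckets.modify s [] (fun l => l ++ [m.1])) buckets)
      PySem.Dict.empty
  (PySem.List.sorted buckets.keys (fun x => x) false).foldl (fun out tier =>
    (PySem.List.sorted (buckets.getD tier []) (fun n => PySem.Str.lower n) false).foldl
      (fun out name =>
        out ++ [String.ofList (PySem.List.pyRepeat ['★'] tier ++ ' ' :: name.toList)]) out) []

-- ===== PRECONDITION & SPEC =====
def Spec_build_starred_values (mods : List (String × List Int)) (out : List String) : Prop := out = build_starred_values_alt mods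
instance (mods : List (String × List Int)) (out : List String) : Decidable (Spec_build_starred_values mods out) := by unfold Spec_build_starred_values; infer_instance

-- ===== CLAIM (what is proved, stated in full; the proofs are below) =====
def Claim_equal_build_starred_values : Prop := ∀ (mods : List (String × List Int)), Dom_build_starred_values mods → Spec_build_starred_values mods (build_starred_values mods)

-- ===== LEMMAS AND PROOFS =====

-- the lexicographic sort key A uses: (star tier, lower-cased name)
def pvKey (p : Int × String) : Lex (Int × String) := toLex (p.1, PySem.Str.lower p.2)

-- the flat (star, name) pair list both proofs talk about
def pvPairs (mods : List (String × List Int)) : List (Int × String) :=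
  mods.flatMap (fun m => m.2.map (fun s => (s, m.1)))

-- sorted(xs ++ [x]) is one insertion into sorted(xs)
theorem pv_sorted_append_singleton {α κ : Type} [LT κ] [DecidableLT κ]
    (xs : List α) (x : α) (key : α → κ) :
    PySem.List.sorted (xs ++ [x]) key =
      PySem.List.insertBy (fun a b => decide (key a < key b)) x (PySem.List.sorted xs key) := by
  rw [PySem.List.sorted_eq_foldl_insertBy, PySem.List.sorted_eq_foldl_insertBy, List.foldl_append]
  rfl

-- inserting x into a key-sorted list, seen through the fibre at key value v
theorem pv_insertBy_filter_key {α κ : Type} [LinearOrder κ] (key : α → κ) (v : κ) (x : α)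
    (acc : List α) (h : acc.Pairwise (fun a b => key a ≤ key b)) :
    (PySem.List.insertBy (fun a b => decide (key a < key b)) x acc).filter
        (fun a => decide (key a = v)) =
      acc.filter (fun a => decide (key a = v)) ++ (if key x = v then [x] else []) := by
  induction acc with
  | nil => simp only [PySem.List.insertBy, List.filter_nil, List.nil_append, List.filter_cons]
           split <;> simp_all
  | cons y ys ih =>
    rw [List.pairwise_cons] at h
    obtain ⟨hy, hys⟩ := h
    by_cases hlt : key x < key y
    · simp only [PySem.List.insertBy, hlt, decide_true, if_true]
      have hnil : (y :: ys).filter (fun a => decide (key a = v)) = [] ∨ ¬ key x = v := by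
        by_cases hv : key x = v
        · left
          apply List.filter_eq_nil_iff.mpr
          intro z hz
          have hle : key y ≤ key z := by
            rcases List.mem_cons.mp hz with rfl | hz'
            · exact le_refl _
            · exact hy z hz'
          have hxz : key x < key z := lt_of_lt_of_le hlt hle
          simp only [decide_eq_true_eq]
          intro hzv; rw [hzv, ← hv] at hxz; exact lt_irrefl _ hxz
        · right; exact hv
      rcases hnil with hnil | hvne
      · rw [List.filter_cons]
        rcases em (key x = v) with hv | hv
        · simp [hv, hnil]
        · simp [hv, hnil]
      · rw [List.filter_cons]
        simp [hvne]
    · simp only [PySem.List.insertBy, hlt, decide_false, Bool.false_eq_true, if_false]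
      rw [List.filter_cons, List.filter_cons]
      rw [ih hys]
      split <;> simp

-- the fibres of a stable sort are the fibres of the input (stability)
theorem pv_filter_key_sorted {α κ : Type} [LinearOrder κ] (key : α → κ) (v : κ) (xs : List α) :
    (PySem.List.sorted xs key).filter (fun a => decide (key a = v)) =
      xs.filter (fun a => decide (key a = v)) := by
  induction xs using List.reverseRecOn with
  | nil => rfl
  | append_singleton xs x ih =>
    rw [pv_sorted_append_singleton,
        pv_insertBy_filter_key key v x _ (PySem.List.sorted_pairwise xs key), ih,
        List.filter_append, List.filter_cons]
    split <;> simp_all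

-- a key-nondecreasing list is determined by its key fibres
theorem pv_eq_of_pairwise_le_of_filter_key {α κ : Type} [LinearOrder κ] (key : α → κ)
    (ys zs : List α) (hy : ys.Pairwise (fun a b => key a ≤ key b))
    (hz : zs.Pairwise (fun a b => key a ≤ key b))
    (hf : ∀ v, ys.filter (fun a => decide (key a = v)) = zs.filter (fun a => decide (key a = v))) :
    ys = zs := by
  induction ys generalizing zs with
  | nil =>
    cases zs with
    | nil => rfl
    | cons b zs' =>
      have := hf (key b)
      simp at this
  | cons a ys' ih =>
    cases zs with
    | nil =>
      have := hf (key a)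
      simp at this
    | cons b zs' =>
      rw [List.pairwise_cons] at hy hz
      obtain ⟨hya, hy'⟩ := hy
      obtain ⟨hzb, hz'⟩ := hz
      have ha : a ∈ b :: zs' := by
        have : a ∈ (b :: zs').filter (fun c => decide (key c = key a)) := by
          rw [← hf (key a)]; simp [List.mem_filter]
        exact (List.mem_filter.mp this).1
      have hb : b ∈ a :: ys' := by
        have : b ∈ (a :: ys').filter (fun c => decide (key c = key b)) := by
          rw [hf (key b)]; simp [List.mem_filter]
        exact (List.mem_filter.mp this).1
      have hba : key b ≤ key a := by
        rcases List.mem_cons.mp ha with rfl | h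
        · exact le_refl _
        · exact hzb a h
      have hab' : key a ≤ key b := by
        rcases List.mem_cons.mp hb with h | h
        · exact le_of_eq (congrArg key h.symm)
        · exact hya b h
      have hab : key a = key b := le_antisymm hab' hba
      have hheads := hf (key a)
      rw [List.filter_cons, List.filter_cons] at hheads
      simp only [decide_true, hab] at hheads
      obtain ⟨haeqb, htail⟩ := List.cons_eq_cons.mp hheads
      subst haeqb
      congr 1
      apply ih zs' hy' hz'
      intro v
      by_cases hv : v = key a
      · subst hv; exact htail
      · have := hf v
        rw [List.filter_cons, List.filter_cons] at this
        rw [if_neg (by simp [Ne.symm hv]), if_neg (by simp [Ne.symm hv])] at this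
        exact this

-- sorted2 is sorted by the lexicographic key
theorem pv_sorted2_eq_sorted_lex {α κ₁ κ₂ : Type} [LinearOrder κ₁] [LinearOrder κ₂]
    (xs : List α) (k1 : α → κ₁) (k2 : α → κ₂) :
    PySem.List.sorted2 xs k1 k2 = PySem.List.sorted xs (fun x => toLex (k1 x, k2 x)) := by
  show List.foldl _ [] xs = List.foldl _ [] xs
  have hcmp : (fun a b => decide (k1 a < k1 b) || (!decide (k1 b < k1 a) && decide (k2 a < k2 b)))
      = fun a b => decide ((fun x => toLex (k1 x, k2 x)) a < (fun x => toLex (k1 x, k2 x)) b) := by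
    funext a b
    simp only [Prod.Lex.lt_iff]
    rcases lt_trichotomy (k1 a) (k1 b) with h | h | h
    · simp [h, not_lt_of_gt h]
    · simp [h]
    · simp [h, not_lt_of_gt h, ne_of_gt h]
  simp only [Bool.false_eq_true, if_false, hcmp]

-- mapping under insertion, when the key factors through the map
theorem pv_map_sorted_insert {α β κ : Type} [LT κ] [DecidableLT κ] (f : α → β) (key : β → κ)
    (x : α) (acc : List α) :
    (PySem.List.insertBy (fun a b => decide (key (f a) < key (f b))) x acc).map f =
      PySem.List.insertBy (fun a b => decide (key a < key b)) (f x) (acc.map f) := by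
  induction acc with
  | nil => rfl
  | cons y ys ih =>
    simp only [PySem.List.insertBy, List.map_cons]
    split <;> simp_all

-- sorting a mapped list = mapping the sort through the composed key
theorem pv_map_sorted {α β κ : Type} [LT κ] [DecidableLT κ] (f : α → β) (key : β → κ)
    (xs : List α) :
    PySem.List.sorted (xs.map f) key = (PySem.List.sorted xs (fun a => key (f a))).map f := by
  induction xs using List.reverseRecOn with
  | nil => rfl
  | append_singleton xs x ih =>
    rw [List.map_append, List.map_singleton, pv_sorted_append_singleton,
        pv_sorted_append_singleton, ih, pv_map_sorted_insert]

-- insertion only looks at the comparator on the inserted element vs list elements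
theorem pv_insertBy_congr {α : Type} (blt1 blt2 : α → α → Bool) (x : α) (l : List α)
    (h : ∀ y ∈ l, blt1 x y = blt2 x y) :
    PySem.List.insertBy blt1 x l = PySem.List.insertBy blt2 x l := by
  induction l with
  | nil => rfl
  | cons y ys ih =>
    simp only [PySem.List.insertBy]
    rw [h y (by simp)]
    split
    · rfl
    · rw [ih (fun z hz => h z (by simp [hz]))]

-- two keys ordering the list's elements identically sort it identically
theorem pv_sorted_key_congr {α κ₁ κ₂ : Type} [LT κ₁] [DecidableLT κ₁] [LT κ₂] [DecidableLT κ₂]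
    (key1 : α → κ₁) (key2 : α → κ₂) (xs : List α)
    (h : ∀ a ∈ xs, ∀ b ∈ xs, (key1 a < key1 b) ↔ (key2 a < key2 b)) :
    PySem.List.sorted xs key1 = PySem.List.sorted xs key2 := by
  induction xs using List.reverseRecOn with
  | nil => rfl
  | append_singleton xs x ih =>
    rw [pv_sorted_append_singleton, pv_sorted_append_singleton,
        ih (fun a ha b hb => h a (by simp [ha]) b (by simp [hb]))]
    apply pv_insertBy_congr
    intro y hy
    have hyx : y ∈ xs := by
      rw [PySem.List.mem_sorted] at hy; exact hy
    simp only [decide_eq_decide]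
    exact h x (by simp) y (by simp [hyx])

-- flatMap of a one-point function on a duplicate-free list
theorem pv_flatMap_single {α β : Type} [DecidableEq α] (l : List α) (tv : α) (F : List β)
    (hl : l.Nodup) :
    l.flatMap (fun t => if t = tv then F else []) = if tv ∈ l then F else [] := by
  induction l with
  | nil => simp
  | cons a l ih =>
    rw [List.nodup_cons] at hl
    rw [List.flatMap_cons, ih hl.2]
    by_cases h : a = tv
    · subst h
      simp [hl.1]
    · simp [h, Ne.symm h]

-- MAIN pair-level fact: the global lex sort is the concatenation of the per-tier sorts
theorem pv_sorted_key_eq_flatMap_tiers (xs : List (Int × String)) :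
    PySem.List.sorted xs pvKey =
      (PySem.List.sorted (PySem.Set.ofList (xs.map Prod.fst)) (fun x => x)).flatMap
        (fun t => PySem.List.sorted (xs.filter (fun p => p.1 == t)) pvKey) := by
  have htiers_lt := PySem.List.sorted_ofList_pairwise_lt (xs := xs.map Prod.fst)
  have htiers_nodup : (PySem.List.sorted (PySem.Set.ofList (xs.map Prod.fst)) (fun x => x)).Nodup :=
    htiers_lt.imp (fun h => ne_of_lt h)
  apply pv_eq_of_pairwise_le_of_filter_key pvKey
  · exact PySem.List.sorted_pairwise xs pvKey
  · rw [List.flatMap_def, List.pairwise_flatten]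
    constructor
    · intro l hl
      rw [List.mem_map] at hl
      obtain ⟨t, _, rfl⟩ := hl
      exact PySem.List.sorted_pairwise _ pvKey
    · rw [List.pairwise_map]
      apply htiers_lt.imp_of_mem
      intro t1 t2 _ _ hlt p hp q hq
      rw [PySem.List.mem_sorted, List.mem_filter] at hp hq
      have hp1 : p.1 = t1 := by simpa using hp.2
      have hq1 : q.1 = t2 := by simpa using hq.2
      apply le_of_lt
      rw [Prod.Lex.lt_iff]
      left
      simpa [pvKey, hp1, hq1] using hlt
  · intro v
    rw [pv_filter_key_sorted, List.filter_flatMap]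
    have hbucket : ∀ t, (PySem.List.sorted (xs.filter (fun p => p.1 == t)) pvKey).filter
        (fun a => decide (pvKey a = v)) =
        if t = (ofLex v).1 then xs.filter (fun a => decide (pvKey a = v)) else [] := by
      intro t
      rw [pv_filter_key_sorted]
      by_cases ht : t = (ofLex v).1
      · rw [if_pos ht, List.filter_filter]
        apply List.filter_congr
        intro p _
        by_cases hv : pvKey p = v
        · have hp1 : p.1 = t := by rw [ht, ← hv]; rfl
          simp [hv, hp1]
        · simp [hv]
      · rw [if_neg ht]
        apply List.filter_eq_nil_iff.mpr
        intro p hp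
        rw [List.mem_filter] at hp
        have hp1 : p.1 = t := by simpa using hp.2
        simp only [decide_eq_true_eq]
        intro hv
        apply ht
        rw [← hp1, ← hv]
        rfl
    simp only [hbucket]
    rw [pv_flatMap_single _ _ _ htiers_nodup]
    by_cases hmem : (ofLex v).1 ∈ PySem.List.sorted (PySem.Set.ofList (xs.map Prod.fst)) (fun x => x)
    · rw [if_pos hmem]
    · rw [if_neg hmem]
      apply List.filter_eq_nil_iff.mpr
      intro p hp
      simp only [decide_eq_true_eq]
      intro hv
      apply hmem
      rw [PySem.List.mem_sorted, PySem.Set.mem_ofList, List.mem_map]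
      exact ⟨p, hp, by rw [← hv]; rfl⟩

-- A in normal form: render the globally sorted pair list
theorem pv_A_norm (mods : List (String × List Int)) :
    build_starred_values mods =
      (PySem.List.sorted2 (pvPairs mods) (fun x => x.1) (fun x => PySem.Str.lower x.2) false).map
        (fun p => String.ofList (PySem.List.pyRepeat ['★'] p.1 ++ ' ' :: p.2.toList)) := by
  show List.foldl _ [] _ = _
  rw [PySem.List.foldl_append_singleton_eq_map, List.nil_append]
  congr 2
  show List.foldl _ [] mods = pvPairs mods
  have : (fun (pairs : List (Int × String)) (m : String × List Int) =>
        m.2.foldl (fun pairs s => pairs ++ [(s, m.1)]) pairs)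
      = fun pairs m => pairs ++ m.2.map (fun s => (s, m.1)) := by
    funext pairs m
    rw [PySem.List.foldl_append_singleton_eq_map]
  rw [this, PySem.List.foldl_append_eq_flatMap, List.nil_append]
  rfl

-- the tier sources coincide
theorem pv_fst_pairs (mods : List (String × List Int)) :
    (pvPairs mods).map Prod.fst = mods.flatMap (fun m => m.2) := by
  rw [pvPairs, List.map_flatMap]
  congr 1
  funext m
  rw [List.map_map]
  exact List.map_id _

-- the nested bucket-building loop is the pair-list loop
theorem pv_buckets_foldl (mods : List (String × List Int)) (d0 : PySem.Dict Int (List String)) :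
    mods.foldl (fun buckets m =>
        m.2.foldl (fun buckets s => buckets.modify s [] (fun l => l ++ [m.1])) buckets) d0 =
      (pvPairs mods).foldl (fun buckets p => buckets.modify p.1 [] (fun l => l ++ [p.2])) d0 := by
  induction mods generalizing d0 with
  | nil => rfl
  | cons m mods ih =>
    rw [List.foldl_cons, ih]
    conv_rhs => rw [pvPairs, List.flatMap_cons, List.foldl_append, List.foldl_map]
    rfl

-- each bucket holds the seconds of A's pairs filtered to that tier
theorem pv_buckets_getD (mods : List (String × List Int)) (t : Int) :
    ((pvPairs mods).foldl (fun buckets p => buckets.modify p.1 [] (fun l => l ++ [p.2]))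
        PySem.Dict.empty).getD t [] =
      ((pvPairs mods).filter (fun p => p.1 == t)).map Prod.snd := by
  rw [PySem.Dict.getD_foldl_modify_append, PySem.Dict.getD_empty, List.nil_append]

-- the bucket keys are the distinct tiers, in first-occurrence order
theorem pv_buckets_keys (mods : List (String × List Int)) :
    ((pvPairs mods).foldl (fun buckets p => buckets.modify p.1 [] (fun l => l ++ [p.2]))
        PySem.Dict.empty).keys =
      PySem.Set.ofList ((pvPairs mods).map Prod.fst) := by
  rw [PySem.Dict.keys_foldl_modify_key]
  rfl

-- B in normal form: concatenate the rendered, sorted per-tier buckets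
theorem pv_B_norm (mods : List (String × List Int)) :
    build_starred_values_alt mods =
      (PySem.List.sorted (PySem.Set.ofList (mods.flatMap (fun m => m.2))) (fun x => x) false).flatMap
        (fun tier =>
          (PySem.List.sorted (((pvPairs mods).filter (fun p => p.1 == tier)).map Prod.snd)
              (fun n => PySem.Str.lower n) false).map (fun name =>
            String.ofList (PySem.List.pyRepeat ['★'] tier ++ ' ' :: name.toList))) := by
  show List.foldl _ [] _ = _
  rw [pv_buckets_foldl]
  have hout : (fun (out : List String) (tier : Int) =>
        (PySem.List.sorted ((((pvPairs mods).foldl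
              (fun buckets p => buckets.modify p.1 [] (fun l => l ++ [p.2]))
              PySem.Dict.empty)).getD tier []) (fun n => PySem.Str.lower n) false).foldl
          (fun out name =>
            out ++ [String.ofList (PySem.List.pyRepeat ['★'] tier ++ ' ' :: name.toList)]) out)
      = fun out tier => out ++
          (PySem.List.sorted (((pvPairs mods).filter (fun p => p.1 == tier)).map Prod.snd)
              (fun n => PySem.Str.lower n) false).map (fun name =>
            String.ofList (PySem.List.pyRepeat ['★'] tier ++ ' ' :: name.toList)) := by
    funext out tier
    rw [PySem.List.foldl_append_singleton_eq_map, pv_buckets_getD]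
  rw [hout, PySem.List.foldl_append_eq_flatMap, List.nil_append, pv_buckets_keys, pv_fst_pairs]

-- one tier's rendered bucket, A-shaped = B-shaped
theorem pv_bucket_eq (mods : List (String × List Int)) (t : Int) :
    ((PySem.List.sorted ((pvPairs mods).filter (fun p => p.1 == t)) pvKey false)).map
        (fun p => String.ofList (PySem.List.pyRepeat ['★'] p.1 ++ ' ' :: p.2.toList)) =
      (PySem.List.sorted (((pvPairs mods).filter (fun p => p.1 == t)).map Prod.snd)
          (fun n => PySem.Str.lower n) false).map (fun name =>
        String.ofList (PySem.List.pyRepeat ['★'] t ++ ' ' :: name.toList)) := by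
  rw [pv_map_sorted, List.map_map]
  have hkey : PySem.List.sorted ((pvPairs mods).filter (fun p => p.1 == t))
        (fun a => PySem.Str.lower a.2) false
      = PySem.List.sorted ((pvPairs mods).filter (fun p => p.1 == t)) pvKey false := by
    apply (pv_sorted_key_congr _ _ _ _).symm
    intro a ha b hb
    rw [List.mem_filter] at ha hb
    have ha1 : a.1 = t := by simpa using ha.2
    have hb1 : b.1 = t := by simpa using hb.2
    rw [pvKey, pvKey, Prod.Lex.lt_iff]
    constructor
    · rintro (h | ⟨-, h⟩)
      · exact absurd h (by simp [ha1, hb1])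
      · exact h
    · intro h; right; exact ⟨by simp [ha1, hb1], h⟩
  rw [hkey]
  apply List.map_congr_left
  intro p hp
  rw [PySem.List.mem_sorted, List.mem_filter] at hp
  have hp1 : p.1 = t := by simpa using hp.2
  simp [hp1]

-- the two programs agree
theorem pv_main (mods : List (String × List Int)) :
    build_starred_values mods = build_starred_values_alt mods := by
  rw [pv_A_norm, pv_B_norm, pv_sorted2_eq_sorted_lex]
  have hlex : (fun (x : Int × String) => toLex (x.1, PySem.Str.lower x.2)) = pvKey := rfl
  rw [hlex, pv_sorted_key_eq_flatMap_tiers, pv_fst_pairs, List.map_flatMap]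
  congr 1
  funext t
  exact pv_bucket_eq mods t

-- ===== VERDICT (by name: the statement is the Claim_ definition above) =====
theorem build_starred_values_spec : Claim_equal_build_starred_values := by
  intro mods _
  exact pv_main mods
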